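-- pv_equiv track=rewrite | github.com/BBN-E/nlplingo | nlplingo/oregon/event_models/uoregon/tools/utils.py | get_start_end
-- ===== SOURCE A (Python) =====
-- def get_start_end(ori_ids, span_dict):
--     start = 1000 ** 2
--     end = - 1000 ** 2
--     for ori_id in ori_ids:
--         span = span_dict[ori_id]
--         start_pos = min(span[0], span[1])
--         end_pos = max(span[0], span[1])
--
--         if start_pos < start:
--             start = start_pos
--
--         if end_pos > end:
--             end = end_pos
--     return start, end
-- ===== SOURCE B (Python) =====
-- def get_start_end(ori_ids, span_dict):
--     # Divide-and-conquer: recursively solve index halves and combine the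
--     # (start, end) pairs; correct because min/max are associative-commutative.
--     def solve(lo, hi):
--         if lo == hi:
--             return 1000 ** 2, -1000 ** 2
--         if hi - lo == 1:
--             sp = span_dict[ori_ids[lo]]
--             return min(sp[0], sp[1], 1000 ** 2), max(sp[0], sp[1], -1000 ** 2)
--         mid = (lo + hi) // 2
--         s1, e1 = solve(lo, mid)
--         s2, e2 = solve(mid, hi)
--         return min(s1, s2), max(e1, e2)
--     return solve(0, len(ori_ids))
-- ===== Notes on version B (the rewrite author's own statement) =====
-- stated objective: alternative
-- what changed: Replaces the sequential accumulator loop with its two conditional-update branches by a divide-and-conquer recursion on index halves, each half returning its own (start, end) pair and pairs being merged with min/max.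
import Mathlib
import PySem

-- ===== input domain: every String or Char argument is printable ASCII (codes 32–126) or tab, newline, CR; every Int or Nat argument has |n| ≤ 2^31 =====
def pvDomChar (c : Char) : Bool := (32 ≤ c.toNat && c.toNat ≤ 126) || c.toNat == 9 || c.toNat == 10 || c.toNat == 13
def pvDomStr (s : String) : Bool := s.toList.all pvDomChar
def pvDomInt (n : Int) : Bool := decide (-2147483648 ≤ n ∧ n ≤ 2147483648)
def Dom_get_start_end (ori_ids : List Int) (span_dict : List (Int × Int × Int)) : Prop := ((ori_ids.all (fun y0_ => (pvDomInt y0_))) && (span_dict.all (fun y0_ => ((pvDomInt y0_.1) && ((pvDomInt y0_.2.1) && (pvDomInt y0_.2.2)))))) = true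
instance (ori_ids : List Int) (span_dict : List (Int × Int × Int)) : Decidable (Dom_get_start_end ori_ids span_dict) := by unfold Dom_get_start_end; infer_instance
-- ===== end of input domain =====

-- B replaces A's sequential accumulator loop by a divide-and-conquer recursion on index halves; same O(n) cost, equivalence is exact on Pre_.

-- ===== PORT A =====
-- span_dict[ori_id]: Python dict subscript; KeyError (missing key) is excluded by Pre_, so the default is never consulted there.
def get_start_end (ori_ids : List Int) (span_dict : List (Int × Int × Int)) : Int × Int :=
  ori_ids.foldl
    (fun st ori_id =>
      let span := (PySem.Dict.mk span_dict).getD ori_id (0, 0)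
      let start_pos := min span.1 span.2
      let end_pos := max span.1 span.2
      let s := if start_pos < st.1 then start_pos else st.1
      let e := if end_pos > st.2 then end_pos else st.2
      (s, e))
    (1000 ^ 2, -(1000 ^ 2))

-- ===== PORT B =====
-- solve(lo, hi) from Source B; the first test is 'lo == hi' in Python — here 'hi ≤ lo', and a
-- fuel parameter (initially |ori_ids| ≥ hi - lo, so never exhausted) makes the recursion
-- structural; both guards only make the same computation total.
def pvSolve (ori_ids : List Int) (span_dict : List (Int × Int × Int)) : Nat → Nat → Nat → Int × Int
  | 0, _, _ => (1000 ^ 2, -(1000 ^ 2))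
  | fuel + 1, lo, hi =>
    if hi ≤ lo then (1000 ^ 2, -(1000 ^ 2))
    else if hi - lo = 1 then
      let sp := (PySem.Dict.mk span_dict).getD (ori_ids.getD lo 0) (0, 0)
      (min (min sp.1 sp.2) (1000 ^ 2), max (max sp.1 sp.2) (-(1000 ^ 2)))
    else
      let mid := (lo + hi) / 2
      let p1 := pvSolve ori_ids span_dict fuel lo mid
      let p2 := pvSolve ori_ids span_dict fuel mid hi
      (min p1.1 p2.1, max p1.2 p2.2)

def get_start_end_alt (ori_ids : List Int) (span_dict : List (Int × Int × Int)) : Int × Int :=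
  pvSolve ori_ids span_dict ori_ids.length 0 ori_ids.length

-- ===== PRECONDITION & SPEC =====
-- Pre_ excludes exactly the inputs on which Python A raises KeyError: some ori_id missing from span_dict.
def Pre_get_start_end (ori_ids : List Int) (span_dict : List (Int × Int × Int)) : Prop :=
  ∀ i ∈ ori_ids, i ∈ span_dict.map Prod.fst
instance (ori_ids : List Int) (span_dict : List (Int × Int × Int)) : Decidable (Pre_get_start_end ori_ids span_dict) := by unfold Pre_get_start_end; infer_instance
def pvWitness_get_start_end : List Int × (List (Int × Int × Int)) := ([1, 2], [(1, 3, 5), (2, 9, 4)])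
def Spec_get_start_end (ori_ids : List Int) (span_dict : List (Int × Int × Int)) (out : Int × Int) : Prop := out = get_start_end_alt ori_ids span_dict
instance (ori_ids : List Int) (span_dict : List (Int × Int × Int)) (out : Int × Int) : Decidable (Spec_get_start_end ori_ids span_dict out) := by unfold Spec_get_start_end; infer_instance

-- ===== CLAIM (what is proved, stated in full; the proofs are below) =====
def Claim_equal_get_start_end : Prop := ∀ (ori_ids : List Int) (span_dict : List (Int × Int × Int)), Dom_get_start_end ori_ids span_dict → Pre_get_start_end ori_ids span_dict → Spec_get_start_end ori_ids span_dict (get_start_end ori_ids span_dict)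

-- ===== LEMMAS AND PROOFS =====

-- the flat coordinate multiset both programs take extrema over
def pvCoords (span_dict : List (Int × Int × Int)) (ids : List Int) : List Int :=
  ids.flatMap (fun ori_id =>
    let sp := (PySem.Dict.mk span_dict).getD ori_id (0, 0)
    [sp.1, sp.2])

theorem pv_foldl_min_pull (t : List Int) (a b : Int) :
    t.foldl min (min a b) = min a (t.foldl min b) := by
  induction t generalizing b with
  | nil => rfl
  | cons c t ih => simp only [List.foldl_cons]; rw [min_assoc, ih]

theorem pv_foldl_max_pull (t : List Int) (a b : Int) :
    t.foldl max (max a b) = max a (t.foldl max b) := by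
  induction t generalizing b with
  | nil => rfl
  | cons c t ih => simp only [List.foldl_cons]; rw [max_assoc, ih]

theorem pv_foldl_min_le (l : List Int) (d : Int) : l.foldl min d ≤ d := by
  induction l generalizing d with
  | nil => exact le_refl d
  | cons c t ih =>
      simp only [List.foldl_cons]
      exact le_trans (ih (min d c)) (min_le_left d c)

theorem pv_le_foldl_max (l : List Int) (d : Int) : d ≤ l.foldl max d := by
  induction l generalizing d with
  | nil => exact le_refl d
  | cons c t ih =>
      simp only [List.foldl_cons]
      exact le_trans (le_max_left d c) (ih (max d c))

theorem pv_min_append (l1 l2 : List Int) (d : Int) :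
    (l1 ++ l2).foldl min d = min (l1.foldl min d) (l2.foldl min d) := by
  rw [List.foldl_append]
  have h : min (l1.foldl min d) d = l1.foldl min d :=
    min_eq_left (pv_foldl_min_le l1 d)
  calc l2.foldl min (l1.foldl min d)
      = l2.foldl min (min (l1.foldl min d) d) := by rw [h]
    _ = min (l1.foldl min d) (l2.foldl min d) := pv_foldl_min_pull l2 _ d

theorem pv_max_append (l1 l2 : List Int) (d : Int) :
    (l1 ++ l2).foldl max d = max (l1.foldl max d) (l2.foldl max d) := by
  rw [List.foldl_append]
  have h : max (l1.foldl max d) d = l1.foldl max d :=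
    max_eq_left (pv_le_foldl_max l1 d)
  calc l2.foldl max (l1.foldl max d)
      = l2.foldl max (max (l1.foldl max d) d) := by rw [h]
    _ = max (l1.foldl max d) (l2.foldl max d) := pv_foldl_max_pull l2 _ d

-- A's loop from any state equals (running min, running max) over the flat coordinate list.
theorem pv_foldA (span_dict : List (Int × Int × Int)) (ids : List Int) (s e : Int) :
    ids.foldl
      (fun st ori_id =>
        let span := (PySem.Dict.mk span_dict).getD ori_id (0, 0)
        let start_pos := min span.1 span.2
        let end_pos := max span.1 span.2
        let s := if start_pos < st.1 then start_pos else st.1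
        let e := if end_pos > st.2 then end_pos else st.2
        (s, e)) (s, e)
    = ((pvCoords span_dict ids).foldl min s, (pvCoords span_dict ids).foldl max e) := by
  induction ids generalizing s e with
  | nil => rfl
  | cons i t ih =>
      simp only [pvCoords, List.foldl_cons, List.flatMap_cons, List.foldl_append] at *
      rw [ih]
      simp only [List.foldl_nil, Prod.mk.injEq]
      constructor <;> congr 1 <;> omega

-- B's divide-and-conquer on [lo, hi) equals (running min, running max) over the
-- coordinates of the corresponding slice of ori_ids.
theorem pv_solve_eq (ori_ids : List Int) (span_dict : List (Int × Int × Int))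
    (n lo hi : Nat) (hfuel : hi - lo ≤ n) (hhi : hi ≤ ori_ids.length) :
    pvSolve ori_ids span_dict n lo hi
    = ((pvCoords span_dict ((ori_ids.drop lo).take (hi - lo))).foldl min (1000 ^ 2),
       (pvCoords span_dict ((ori_ids.drop lo).take (hi - lo))).foldl max (-(1000 ^ 2))) := by
  induction n generalizing lo hi with
  | zero =>
      have h0 : hi - lo = 0 := Nat.le_zero.mp hfuel
      simp [pvSolve, h0, pvCoords]
  | succ n ih =>
      by_cases hle : hi ≤ lo
      · rw [pvSolve, if_pos hle]
        have h0 : hi - lo = 0 := by omega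
        simp [h0, pvCoords]
      · by_cases h1 : hi - lo = 1
        · rw [pvSolve, if_neg hle, if_pos h1]
          have hlt : lo < ori_ids.length := by omega
          have hdrop : ori_ids.drop lo = ori_ids[lo] :: ori_ids.drop (lo + 1) :=
            List.drop_eq_getElem_cons hlt
          have hget : ori_ids.getD lo 0 = ori_ids[lo] := by
            simp [List.getD_eq_getElem?_getD, List.getElem?_eq_getElem hlt]
          rw [h1, hdrop, hget]
          simp only [List.take_succ_cons, List.take_zero, pvCoords, List.flatMap_cons,
            List.flatMap_nil, List.append_nil, List.foldl_cons, List.foldl_nil,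
            Prod.mk.injEq]
          constructor <;> omega
        · rw [pvSolve, if_neg hle, if_neg h1]
          have hmid1 : lo < (lo + hi) / 2 := by omega
          have hmid2 : (lo + hi) / 2 < hi := by omega
          simp only [ih lo ((lo + hi) / 2) (by omega) (by omega),
              ih ((lo + hi) / 2) hi (by omega) hhi]
          have hdd : (ori_ids.drop lo).drop ((lo + hi) / 2 - lo)
              = ori_ids.drop ((lo + hi) / 2) := by
            rw [List.drop_drop]; congr 1; omega
          have hsplit : (ori_ids.drop lo).take (hi - lo)
              = (ori_ids.drop lo).take ((lo + hi) / 2 - lo)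
                ++ (ori_ids.drop ((lo + hi) / 2)).take (hi - (lo + hi) / 2) := by
            have he : hi - lo = ((lo + hi) / 2 - lo) + (hi - (lo + hi) / 2) := by omega
            rw [he, List.take_add, hdd]
          rw [hsplit]
          simp only [pvCoords, List.flatMap_append, pv_min_append, pv_max_append]

-- ===== VERDICT (by name: the statement is the Claim_ definition above) =====
theorem get_start_end_spec : Claim_equal_get_start_end := by
  intro ori_ids span_dict _ _
  unfold Spec_get_start_end get_start_end get_start_end_alt
  rw [pv_foldA, pv_solve_eq ori_ids span_dict ori_ids.length 0 ori_ids.length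
      (by omega) (le_refl _)]
  simp
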